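-- pv_equiv track=rewrite | github.com/liuxianyi/2020MathE | code/final_coda.py | get_month_list
-- ===== SOURCE A (Python) =====
-- def get_month_list(data, init_year=2012, init_month=1, stride=4):
--
--     first_year_months = [i for i in range(init_month, 13)]
--     out_dates = ['{}/{}'.format(init_year, month) for month in first_year_months]
--     current_year = init_year
--
--     all_year_months = [i for i in range(1, 13)]
--     while len(out_dates) < len(data):
--         current_year += 1
--         for month_c in all_year_months:
--             out_dates.append('{}/{}'.format(current_year, month_c))
--     out_dates = out_dates[:len(data)]
--     out_ticks = [i for i in range(len(out_dates))]
--     out_dates = [out_dates[i] for i in range(len(out_dates)) if i % stride == 0]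
--     out_ticks = [i for i in range(len(out_ticks)) if i % stride == 0]
--     return out_ticks, out_dates
-- ===== SOURCE B (Python) =====
-- def get_month_list(data, init_year=2012, init_month=1, stride=4):
--     n = len(data)
--     first = max(0, 13 - init_month)
--
--     def label(i):
--         if i < first:
--             return '{}/{}'.format(init_year, init_month + i)
--         j = i - first
--         return '{}/{}'.format(init_year + 1 + j // 12, j % 12 + 1)
--
--     out_ticks = [i for i in range(n) if i % stride == 0]
--     out_dates = [label(i) for i in out_ticks]
--     return out_ticks, out_dates
-- ===== Notes on version B (the rewrite author's own statement) =====
-- stated objective: faster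
-- what changed: Replaces the while-loop that accumulates whole calendar years into a list and then truncates and filters it with direct index arithmetic: each kept tick i maps straight to its label via a two-segment closed form (first partial year, then j//12 and j%12), so labels are formatted only for the kept indices.
import Mathlib
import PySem

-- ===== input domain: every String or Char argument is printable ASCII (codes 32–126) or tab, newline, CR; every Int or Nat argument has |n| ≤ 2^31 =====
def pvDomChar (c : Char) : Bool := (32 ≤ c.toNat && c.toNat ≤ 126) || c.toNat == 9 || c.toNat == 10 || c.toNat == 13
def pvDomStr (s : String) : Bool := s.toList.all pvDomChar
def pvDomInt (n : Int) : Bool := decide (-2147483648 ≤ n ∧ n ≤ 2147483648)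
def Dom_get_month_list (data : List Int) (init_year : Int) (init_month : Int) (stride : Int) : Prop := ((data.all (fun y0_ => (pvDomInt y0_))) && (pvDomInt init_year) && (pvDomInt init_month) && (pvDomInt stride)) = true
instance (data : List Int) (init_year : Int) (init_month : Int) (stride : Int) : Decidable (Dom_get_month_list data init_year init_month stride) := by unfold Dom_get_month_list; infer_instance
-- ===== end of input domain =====

-- B replaces A's year-accumulating while-loop + truncate + filter by a direct closed-form
-- label computed only for each kept index (measurably faster); return values proved equal on
-- Pre_ (A and B both raise ZeroDivisionError exactly when stride = 0 and data ≠ []).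

-- ===== PORT A =====
-- '{}/{}'.format(y, m)
def pvFmt (y m : Int) : String := PySem.Int.toStr y ++ "/" ++ PySem.Int.toStr m

-- one iteration of the for-loop body: append '{current_year}/{m}' for m in all_year_months
def pvYearBlock (y : Int) : List String := (PySem.List.pyRange 1 13 1).map (fun m => pvFmt y m)

-- the 'while len(out_dates) < len(data)' loop (each pass appends one full year)
def pvFill (dl : Nat) (cur : Int) (acc : List String) : List String :=
  if acc.length < dl then pvFill dl (cur + 1) (acc ++ pvYearBlock (cur + 1)) else acc
termination_by dl - acc.length
decreasing_by
  simp [pvYearBlock, PySem.List.length_pyRange_one]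
  omega

def get_month_list (data : List Int) (init_year : Int) (init_month : Int) (stride : Int) : List Int × List String :=
  let first_year_months := PySem.List.pyRange init_month 13 1
  let out_dates := first_year_months.map (fun month => pvFmt init_year month)
  let out_dates := pvFill data.length init_year out_dates
  let out_dates := PySem.List.slice out_dates none (some (data.length : Int))   -- out_dates[:len(data)]
  let out_ticks := PySem.List.pyRange 0 (out_dates.length : Int) 1
  let out_dates' := ((PySem.List.pyRange 0 (out_dates.length : Int) 1).filter
      (fun i => decide (PySem.Int.mod i stride = 0))).map (fun i => PySem.List.pyGetD out_dates i "")
  let out_ticks' := (PySem.List.pyRange 0 (out_ticks.length : Int) 1).filter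
      (fun i => decide (PySem.Int.mod i stride = 0))
  (out_ticks', out_dates')

-- ===== PORT B =====
def pvLabel (init_year init_month first : Int) (i : Int) : String :=
  if i < first then pvFmt init_year (init_month + i)
  else pvFmt (init_year + 1 + PySem.Int.floordiv (i - first) 12)
             (PySem.Int.mod (i - first) 12 + 1)

def get_month_list_alt (data : List Int) (init_year : Int) (init_month : Int) (stride : Int) : List Int × List String :=
  let n : Int := data.length
  let first : Int := max 0 (13 - init_month)
  let out_ticks := (PySem.List.pyRange 0 n 1).filter (fun i => decide (PySem.Int.mod i stride = 0))
  (out_ticks, out_ticks.map (pvLabel init_year init_month first))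

-- ===== PRECONDITION & SPEC =====
-- Pre_ excludes exactly the inputs where Python A raises ZeroDivisionError (i % 0 with a
-- nonempty data); B raises there too.
def Pre_get_month_list (data : List Int) (init_year : Int) (init_month : Int) (stride : Int) : Prop :=
  data = [] ∨ stride ≠ 0
instance (data : List Int) (init_year : Int) (init_month : Int) (stride : Int) : Decidable (Pre_get_month_list data init_year init_month stride) := by unfold Pre_get_month_list; infer_instance

def pvWitness_get_month_list : List Int × Int × Int × Int := ([3, 1, 4, 1, 5], 2012, 1, 4)

def Spec_get_month_list (data : List Int) (init_year : Int) (init_month : Int) (stride : Int) (out : List Int × List String) : Prop := out = get_month_list_alt data init_year init_month stride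
instance (data : List Int) (init_year : Int) (init_month : Int) (stride : Int) (out : List Int × List String) : Decidable (Spec_get_month_list data init_year init_month stride out) := by unfold Spec_get_month_list; infer_instance

-- ===== CLAIM (what is proved, stated in full; the proofs are below) =====
def Claim_equal_get_month_list : Prop := ∀ (data : List Int) (init_year : Int) (init_month : Int) (stride : Int), Dom_get_month_list data init_year init_month stride → Pre_get_month_list data init_year init_month stride → Spec_get_month_list data init_year init_month stride (get_month_list data init_year init_month stride)

-- ===== LEMMAS AND PROOFS =====

-- the while-loop always reaches the required length
lemma pvFill_length_ge (dl : Nat) (cur : Int) (acc : List String) :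
    dl ≤ (pvFill dl cur acc).length := by
  fun_induction pvFill dl cur acc with
  | case1 cur acc h ih => exact ih
  | case2 cur acc h => omega

-- index characterisation of the filled list
lemma pvFill_getElem? (dl : Nat) (cur : Int) (acc : List String) (k : Nat) (hk : k < dl) :
    (pvFill dl cur acc)[k]? =
      if k < acc.length then acc[k]?
      else some (pvFmt (cur + 1 + ((k - acc.length) / 12 : Nat))
                       (((k - acc.length) % 12 : Nat) + 1)) := by
  fun_induction pvFill dl cur acc with
  | case2 cur acc h =>
    simp only [Nat.not_lt] at h
    rw [if_pos (by omega)]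
  | case1 cur acc h ih =>
    rw [ih]
    have hblk : (pvYearBlock (cur + 1)).length = 12 := by
      simp [pvYearBlock, PySem.List.length_pyRange_one]
    simp only [List.length_append, hblk]
    by_cases h1 : k < acc.length
    · rw [if_pos (by omega), if_pos h1, List.getElem?_append_left h1]
    · rw [if_neg h1]
      by_cases h2 : k < acc.length + 12
      · rw [if_pos (by omega)]
        rw [List.getElem?_append_right (by omega)]
        have hj : k - acc.length < 12 := by omega
        have hb : (pvYearBlock (cur + 1))[k - acc.length]? =
            some (pvFmt (cur + 1) (1 + ((k - acc.length : Nat) : Int))) := by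
          simp only [pvYearBlock, List.getElem?_map,
            PySem.List.getElem?_pyRange_one]
          rw [if_pos (by omega)]
          rfl
        rw [hb]
        congr 2
        · have h0 : (k - acc.length) / 12 = 0 := Nat.div_eq_of_lt hj
          rw [h0]; omega
        · have h0 : (k - acc.length) % 12 = k - acc.length := Nat.mod_eq_of_lt hj
          rw [h0]; omega
      · rw [if_neg (by omega)]
        congr 2
        · omega
        · omega

lemma pvPrefix_getElem? (init_year init_month : Int) (k : Nat)
    (hk : k < (13 - init_month).toNat) :
    (((PySem.List.pyRange init_month 13 1).map (fun month => pvFmt init_year month)))[k]? =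
      some (pvFmt init_year (init_month + k)) := by
  simp only [List.getElem?_map, PySem.List.getElem?_pyRange_one]
  rw [if_pos hk]
  rfl

-- ===== VERDICT (by name: the statement is the Claim_ definition above) =====
theorem get_month_list_spec : Claim_equal_get_month_list := by
  intro data init_year init_month stride _hdom _hpre
  unfold Spec_get_month_list get_month_list get_month_list_alt
  have hWlen : data.length ≤ (pvFill data.length init_year
      ((PySem.List.pyRange init_month 13 1).map (fun month => pvFmt init_year month))).length :=
    pvFill_length_ge _ _ _
  have htrunc : PySem.List.slice (pvFill data.length init_year
        ((PySem.List.pyRange init_month 13 1).map (fun month => pvFmt init_year month)))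
        none (some (data.length : Int)) =
      (pvFill data.length init_year
        ((PySem.List.pyRange init_month 13 1).map (fun month => pvFmt init_year month))).take
        data.length := PySem.List.slice_to_natCast _ _
  have hlen2 : (PySem.List.slice (pvFill data.length init_year
        ((PySem.List.pyRange init_month 13 1).map (fun month => pvFmt init_year month)))
        none (some (data.length : Int))).length = data.length := by
    rw [htrunc, List.length_take]; omega
  simp only [hlen2]
  have hcast : (((PySem.List.pyRange 0 (data.length : Int) 1).length : Int)) = (data.length : Int) := by
    rw [PySem.List.length_pyRange_one]; omega
  rw [hcast]
  refine Prod.ext rfl ?_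
  apply List.map_congr_left
  intro i hi
  set n := data.length with hn
  set S0 := (PySem.List.pyRange init_month 13 1).map (fun month => pvFmt init_year month) with hS0
  have hS0len : S0.length = (13 - init_month).toNat := by
    simp [hS0, PySem.List.length_pyRange_one]
  have hi' : 0 ≤ i ∧ i < (n : Int) := by
    have hm := List.mem_of_mem_filter hi
    exact (PySem.List.mem_pyRange_one).mp hm
  obtain ⟨hi0, hin⟩ := hi'
  set k := i.toNat with hk
  have hik : i = (k : Int) := by omega
  have hkn : k < n := by omega
  have hget : PySem.List.pyGetD (PySem.List.slice (pvFill n init_year S0) none (some (n : Int))) i "" =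
      ((pvFill n init_year S0).take n).getD k "" := by
    rw [htrunc, hik, PySem.List.pyGetD_natCast]
  rw [hget]
  have htk : ((pvFill n init_year S0).take n)[k]? = (pvFill n init_year S0)[k]? := by
    exact List.getElem?_take_of_lt hkn
  rw [List.getD_eq_getElem?_getD, htk, pvFill_getElem? n init_year S0 k hkn]
  unfold pvLabel
  by_cases hcase : k < S0.length
  · rw [if_pos hcase]
    rw [hS0, pvPrefix_getElem? init_year init_month k (by omega)]
    rw [if_pos (by rw [hik]; omega)]
    simp [hik]
  · rw [if_neg hcase]
    rw [if_neg (by rw [hik]; omega)]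
    have hji : i - max 0 (13 - init_month) = ((k - S0.length : Nat) : Int) := by omega
    simp only [Option.getD_some]
    rw [hji]
    congr 2
    · rw [show ((12 : Int)) = ((12 : Nat) : Int) by norm_num,
        PySem.Int.floordiv_natCast]
    · rw [show ((12 : Int)) = ((12 : Nat) : Int) by norm_num,
        PySem.Int.mod_natCast]
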